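-- pv_equiv track=rewrite | github.com/vjhwong/Kandidatarbete | Visualisation/spread_list_functions.py | count_gap_length
-- ===== SOURCE A (Python) =====
-- def count_gap_length(valid_list: list) -> float:
--     total_gap_length = 0
--     gap_length = 0
--
--     for value in valid_list:
--         if value == 0:
--             gap_length += 1
--         else:  # if current value == 1
--             if gap_length >= 2:
--                 total_gap_length += gap_length - 1
--             gap_length = 0
--     # If the last values were also 0s and the gap length is at least 2.
--     # Add the length of the gap to the total gap length
--     if gap_length >= 2:
--         total_gap_length += gap_length - 1
--     return total_gap_length
-- ===== SOURCE B (Python) =====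
-- def count_gap_length(valid_list: list) -> float:
--     # A gap of length L contains exactly L - 1 adjacent zero pairs (and a gap of
--     # length < 2 contributes 0 = L - 1 pairs), so the total is just the number of
--     # adjacent positions where both values are 0.
--     return sum(1 for a, b in zip(valid_list, valid_list[1:]) if a == 0 and b == 0)
-- ===== Notes on version B (the rewrite author's own statement) =====
-- stated objective: simpler
-- what changed: Replaced A's run-length accumulator with post-loop fixup by a closed-form reformulation: the answer equals the number of adjacent zero pairs, counted in one comprehension over zip(xs, xs[1:]).
import Mathlib
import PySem

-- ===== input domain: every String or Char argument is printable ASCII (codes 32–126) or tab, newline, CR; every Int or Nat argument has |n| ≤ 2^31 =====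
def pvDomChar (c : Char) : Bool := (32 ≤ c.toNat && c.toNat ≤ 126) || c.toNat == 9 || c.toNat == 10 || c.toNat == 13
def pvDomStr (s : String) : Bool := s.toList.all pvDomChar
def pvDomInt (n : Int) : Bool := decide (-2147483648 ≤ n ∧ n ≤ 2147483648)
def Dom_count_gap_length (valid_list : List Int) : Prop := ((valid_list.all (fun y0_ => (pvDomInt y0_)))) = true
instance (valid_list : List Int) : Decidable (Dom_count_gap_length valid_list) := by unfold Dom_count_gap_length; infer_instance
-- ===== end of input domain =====

-- B replaces A's run-length accumulator with post-loop fixup by a closed-form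
-- reformulation: the answer equals the number of adjacent zero pairs (simpler).


-- ===== PORT A =====
def count_gap_length (valid_list : List Int) : Int :=
  let st := valid_list.foldl
    (fun (s : Int × Int) value =>
      if value == 0 then (s.1, s.2 + 1)
      else (if s.2 ≥ 2 then s.1 + (s.2 - 1) else s.1, 0))
    (0, 0)
  if st.2 ≥ 2 then st.1 + (st.2 - 1) else st.1

-- ===== PORT B =====
-- sum(1 for a, b in zip(valid_list, valid_list[1:]) if a == 0 and b == 0)
def count_gap_length_alt (valid_list : List Int) : Int :=
  (valid_list.zip (PySem.List.slice valid_list (some 1) none)).foldl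
    (fun t ab => if ab.1 == 0 && ab.2 == 0 then t + 1 else t) 0

-- ===== PRECONDITION & SPEC =====
def Spec_count_gap_length (valid_list : List Int) (out : Int) : Prop := out = count_gap_length_alt valid_list
instance (valid_list : List Int) (out : Int) : Decidable (Spec_count_gap_length valid_list out) := by unfold Spec_count_gap_length; infer_instance

-- ===== CLAIM =====
def Claim_equal_count_gap_length : Prop := ∀ (valid_list : List Int), Dom_count_gap_length valid_list → Spec_count_gap_length valid_list (count_gap_length valid_list)

-- ===== LEMMAS AND PROOFS =====

-- closing value of a pending gap of length g
def pvClose (g : Int) : Int := if g ≥ 2 then g - 1 else 0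

-- A's loop as structural recursion on the list, carrying the pending gap
def pvA (g : Int) : List Int → Int
  | [] => pvClose g
  | x :: xs => if x = 0 then pvA (g + 1) xs else pvClose g + pvA 0 xs

-- number of adjacent zero pairs
def pvZP : List Int → Int
  | [] => 0
  | [_] => 0
  | a :: b :: rest => (if a = 0 ∧ b = 0 then 1 else 0) + pvZP (b :: rest)

theorem pvA_fold (l : List Int) (t g : Int) :
    (let st := l.foldl
      (fun (s : Int × Int) value =>
        if value == 0 then (s.1, s.2 + 1)
        else (if s.2 ≥ 2 then s.1 + (s.2 - 1) else s.1, 0))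
      (t, g)
     if st.2 ≥ 2 then st.1 + (st.2 - 1) else st.1) = t + pvA g l := by
  induction l generalizing t g with
  | nil => simp [pvA, pvClose]; split <;> ring
  | cons x xs ih =>
    by_cases hx : x = 0
    · simp only [List.foldl_cons, hx, pvA]
      simpa using ih t (g + 1)
    · simp only [List.foldl_cons, beq_iff_eq, hx, if_false, pvA]
      by_cases hg : g ≥ 2
      · simp only [if_pos hg]
        have h := ih (t + (g - 1)) 0
        simp only [beq_iff_eq] at h ⊢
        rw [h, pvClose, if_pos hg]; ring
      · simp only [if_neg hg]
        have h := ih t 0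
        simp only [beq_iff_eq] at h ⊢
        rw [h, pvClose, if_neg hg]; ring

theorem pvZP_fold (l : List Int) (t : Int) :
    (l.zip l.tail).foldl (fun t ab => if ab.1 == 0 && ab.2 == 0 then t + 1 else t) t
      = t + pvZP l := by
  induction l generalizing t with
  | nil => simp [pvZP]
  | cons a xs ih =>
    cases xs with
    | nil => simp [pvZP]
    | cons b r =>
      simp only [List.tail_cons, List.zip_cons_cons, List.foldl_cons]
      rw [show (b :: r).zip r = (b :: r).zip (b :: r).tail from rfl, ih]
      simp only [pvZP]
      by_cases ha : a = 0 <;> by_cases hb : b = 0 <;> simp [ha, hb] <;> ring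

theorem pvZP_cons_ne (x : Int) (xs : List Int) (hx : x ≠ 0) :
    pvZP (x :: xs) = pvZP xs := by
  cases xs with
  | nil => simp [pvZP]
  | cons b r => simp [pvZP, hx]

theorem pvZP_rep (n : Nat) :
    pvZP (List.replicate n 0) = if n = 0 then 0 else (n : Int) - 1 := by
  induction n with
  | zero => simp [pvZP]
  | succ m ih =>
    cases m with
    | zero => simp [pvZP, List.replicate]
    | succ k =>
      rw [List.replicate_succ, List.replicate_succ]
      rw [show pvZP (0 :: 0 :: List.replicate k 0)
            = (if (0:Int) = 0 ∧ (0:Int) = 0 then 1 else 0) + pvZP (0 :: List.replicate k 0) from rfl]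
      rw [← List.replicate_succ, ih]
      simp; push_cast; ring

theorem pvZP_rep_append (n : Nat) (x : Int) (xs : List Int) (hx : x ≠ 0) :
    pvZP (List.replicate n 0 ++ x :: xs)
      = (if n = 0 then 0 else (n : Int) - 1) + pvZP xs := by
  induction n with
  | zero => simp [pvZP_cons_ne x xs hx]
  | succ m ih =>
    cases m with
    | zero => simp [pvZP, hx, pvZP_cons_ne x xs hx]
    | succ k =>
      rw [List.replicate_succ, List.replicate_succ, List.cons_append, List.cons_append]
      rw [show pvZP (0 :: 0 :: (List.replicate k 0 ++ x :: xs))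
            = (if (0:Int) = 0 ∧ (0:Int) = 0 then 1 else 0) + pvZP (0 :: (List.replicate k 0 ++ x :: xs)) from rfl]
      rw [show (0 : Int) :: (List.replicate k 0 ++ x :: xs)
            = List.replicate (k + 1) 0 ++ x :: xs by simp [List.replicate_succ]]
      rw [ih]
      simp; push_cast; ring

theorem pvKey (l : List Int) (g : Int) (n : Nat) (hg : g = (n : Int)) :
    pvA g l = pvZP (List.replicate n 0 ++ l) := by
  induction l generalizing g n with
  | nil =>
    simp only [pvA, List.append_nil, pvZP_rep, pvClose, hg]
    split_ifs <;> simp_all <;> omega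
  | cons x xs ih =>
    by_cases hx : x = 0
    · subst hx
      simp only [pvA, if_pos rfl]
      rw [ih (g + 1) (n + 1) (by omega)]
      congr 1
      simp [List.replicate_succ', List.append_assoc]
    · simp only [pvA, if_neg hx]
      rw [ih 0 0 rfl, List.replicate, List.nil_append,
        pvZP_rep_append n x xs hx, pvClose, hg]
      split_ifs <;> simp_all <;> omega

-- ===== VERDICT =====
theorem count_gap_length_spec : Claim_equal_count_gap_length := by
  intro l _
  unfold Spec_count_gap_length count_gap_length count_gap_length_alt
  rw [PySem.List.slice_from_one, pvZP_fold]
  have h := pvA_fold l 0 0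
  simp only at h
  rw [h, pvKey l 0 0 rfl]
  simp
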